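-- pv_equiv track=rewrite | github.com/Guo-xuejian/leetcode-practice | LCP39.无人机方阵.py | minimumSwitchingTimes
-- ===== SOURCE A (Python) =====
-- from typing import List
--
-- def minimumSwitchingTimes(source: List[List[int]], target: List[List[int]]) -> int:
--     # 执行用时：124 ms, 在所有 Python3 提交中击败了66.90%的用户
--     # 内存消耗：16.4 MB, 在所有 Python3 提交中击败了88.03%的用户
--     color_dict = {}
--     for i, row in enumerate(source):
--         for j, val in enumerate(row):
--             # 第一个图案无人机颜色数量统计
--             if val in color_dict:
--                 color_dict[val] += 1
--             else:
--                 color_dict[val] = 1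
--
--             # 第二个图案无人机颜色与第一个图案做减法操作，存在抵消一个，不存在记为持续减 1
--             if target[i][j] in color_dict:
--                 color_dict[target[i][j]] -= 1
--             else:
--                 color_dict[target[i][j]] = -1
--     res = 0
--     for val in color_dict.values():
--         res += abs(val)
--
--     return int(res / 2)
-- ===== SOURCE B (Python) =====
-- def minimumSwitchingTimes(source, target):
--     # Sort-and-merge: the answer is the number of cells minus the size of the
--     # largest multiset matching between source colors and target colors, found
--     # by a two-pointer sweep over the two sorted color lists.
--     a = sorted(s for srow, trow in zip(source, target) for s, _ in zip(srow, trow))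
--     b = sorted(t for srow, trow in zip(source, target) for _, t in zip(srow, trow))
--     match = 0
--     i = j = 0
--     while i < len(a) and j < len(b):
--         if a[i] == b[j]:
--             match += 1
--             i += 1
--             j += 1
--         elif a[i] < b[j]:
--             i += 1
--         else:
--             j += 1
--     return len(a) - match
-- ===== Notes on version B (the rewrite author's own statement) =====
-- stated objective: alternative
-- what changed: B replaces A's single interleaved signed-counter dict (sum of abs values halved) by a sort-and-merge algorithm: it sorts the flattened source colors and target colors and counts the matched cells with a two-pointer sweep, returning total cells minus matches.
import Mathlib
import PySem

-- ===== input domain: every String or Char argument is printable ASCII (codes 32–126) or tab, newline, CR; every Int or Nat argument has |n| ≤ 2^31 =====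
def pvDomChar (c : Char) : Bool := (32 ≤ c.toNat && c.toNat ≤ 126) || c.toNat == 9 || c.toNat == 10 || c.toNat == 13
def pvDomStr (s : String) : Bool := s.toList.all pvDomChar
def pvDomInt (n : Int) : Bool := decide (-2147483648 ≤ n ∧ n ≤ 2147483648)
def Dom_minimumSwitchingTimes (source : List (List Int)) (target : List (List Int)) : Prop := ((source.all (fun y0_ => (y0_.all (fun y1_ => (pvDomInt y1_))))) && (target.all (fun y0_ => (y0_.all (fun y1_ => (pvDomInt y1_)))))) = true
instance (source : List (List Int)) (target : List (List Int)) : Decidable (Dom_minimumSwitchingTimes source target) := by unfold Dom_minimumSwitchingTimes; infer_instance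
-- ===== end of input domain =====

-- B replaces A's interleaved signed-counter dict (sum of abs values, halved) by a sort-and-merge
-- algorithm: sort the flattened source and target colors and count matched cells by a
-- two-pointer sweep, returning total cells minus matches (alternative decomposition).

-- ===== PORT A =====
-- one loop body iteration (the two membership-checked updates on color_dict for one cell)
def pvACell (d : PySem.Dict Int Int) (val tval : Int) : PySem.Dict Int Int :=
  let d1 := if d.contains val then d.modify val 0 (· + 1) else d.insert val 1
  if d1.contains tval then d1.modify tval 0 (· - 1) else d1.insert tval (-1)

-- the two nested 'for … in enumerate(…)' loops; 'target[i][j]' is PySem.List.pyGet? twice,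
-- evaluated only inside the inner loop (none = IndexError, propagated by foldlM)
def pvALoop (source : List (List Int)) (target : List (List Int)) :
    Option (PySem.Dict Int Int) :=
  (PySem.List.enumerate source).foldlM
    (fun d ir =>
      (PySem.List.enumerate ir.2).foldlM
        (fun d jv =>
          ((PySem.List.pyGet? target ir.1).bind
            (fun trow => PySem.List.pyGet? trow jv.1)).map
            (fun t => pvACell d jv.2 t))
        d)
    PySem.Dict.empty

def minimumSwitchingTimes (source : List (List Int)) (target : List (List Int)) : Int :=
  match pvALoop source target with
  | none => 0   -- IndexError: excluded by Pre_minimumSwitchingTimes (A raises there)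
  | some d =>
      -- res = 0; for val in color_dict.values(): res += abs(val)
      let res := d.values.foldl (fun r v => r + |v|) 0
      -- int(res/2): res is a nonnegative even integer here, so this is exact floor division
      PySem.Int.floordiv res 2

-- ===== PORT B =====
-- a = sorted(s for srow, trow in zip(source, target) for s, _ in zip(srow, trow))
def pvFlatS (source : List (List Int)) (target : List (List Int)) : List Int :=
  (source.zip target).flatMap (fun p => (p.1.zip p.2).map (·.1))

-- b = sorted(t for srow, trow in zip(source, target) for _, t in zip(srow, trow))
def pvFlatT (source : List (List Int)) (target : List (List Int)) : List Int :=
  (source.zip target).flatMap (fun p => (p.1.zip p.2).map (·.2))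

-- the while loop with pointers i, j, transcribed as recursion on the two remaining suffixes
def pvTwoPtr : List Int → List Int → Int
  | [], _ => 0
  | _ :: _, [] => 0
  | a :: as, b :: bs =>
    if a = b then 1 + pvTwoPtr as bs
    else if a < b then pvTwoPtr as (b :: bs)
    else pvTwoPtr (a :: as) bs
termination_by x y => x.length + y.length

def minimumSwitchingTimes_alt (source : List (List Int)) (target : List (List Int)) : Int :=
  let a := PySem.List.sorted (pvFlatS source target) (fun x => x) false
  let b := PySem.List.sorted (pvFlatT source target) (fun x => x) false
  (a.length : Int) - pvTwoPtr a b

-- ===== PRECONDITION & SPEC =====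
-- Pre_ excludes exactly the inputs on which A raises IndexError: a nonempty source row whose
-- index has no target row, or whose target row is shorter than it (target[i][j] fails there).
def Pre_minimumSwitchingTimes (source : List (List Int)) (target : List (List Int)) : Prop :=
  ∀ i (h : i < source.length), source[i] ≠ [] →
    ∃ h2 : i < target.length, source[i].length ≤ target[i].length
instance (source : List (List Int)) (target : List (List Int)) : Decidable (Pre_minimumSwitchingTimes source target) := by unfold Pre_minimumSwitchingTimes; infer_instance

def pvWitness_minimumSwitchingTimes : List (List Int) × List (List Int) :=
  ([[1, 2], [3, 4]], [[2, 1], [4, 5]])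

def Spec_minimumSwitchingTimes (source : List (List Int)) (target : List (List Int)) (out : Int) : Prop := out = minimumSwitchingTimes_alt source target
instance (source : List (List Int)) (target : List (List Int)) (out : Int) : Decidable (Spec_minimumSwitchingTimes source target out) := by unfold Spec_minimumSwitchingTimes; infer_instance

-- ===== CLAIM (what is proved, stated in full; the proofs are below) =====
def Claim_equal_minimumSwitchingTimes : Prop := ∀ (source : List (List Int)) (target : List (List Int)), Dom_minimumSwitchingTimes source target → Pre_minimumSwitchingTimes source target → Spec_minimumSwitchingTimes source target (minimumSwitchingTimes source target)

-- ===== LEMMAS AND PROOFS =====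

theorem pv_witness_ok :
    Dom_minimumSwitchingTimes pvWitness_minimumSwitchingTimes.1 pvWitness_minimumSwitchingTimes.2 ∧
    Pre_minimumSwitchingTimes pvWitness_minimumSwitchingTimes.1 pvWitness_minimumSwitchingTimes.2 := by
  decide

-- the flattened lockstep cell pairs (proof-side view shared by both sides)
def pvPairs (source : List (List Int)) (target : List (List Int)) : List (Int × Int) :=
  (source.zip target).flatMap (fun p => p.1.zip p.2)

-- step over one cell pair (proof-side abbreviation)
def pvStep (d : PySem.Dict Int Int) (p : Int × Int) : PySem.Dict Int Int := pvACell d p.1 p.2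

-- signed count of color c among the cell pairs
def pvF (cells : List (Int × Int)) (c : Int) : Int :=
  ((cells.map (·.1)).count c : Int) - ((cells.map (·.2)).count c : Int)

lemma pv_enum_shift {α : Type} (xs : List α) (s : Int) :
    PySem.List.enumerate xs (s + 1) = (PySem.List.enumerate xs s).map (fun p => (p.1 + 1, p.2)) := by
  induction xs generalizing s with
  | nil => simp [PySem.List.enumerate_nil]
  | cons x xs ih => simp [PySem.List.enumerate_cons, ih (s + 1)]

lemma pv_foldlM_congr {α σ : Type} (l : List α) (f g : σ → α → Option σ) (d : σ)
    (h : ∀ d p, p ∈ l → f d p = g d p) : l.foldlM f d = l.foldlM g d := by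
  induction l generalizing d with
  | nil => rfl
  | cons a l ih =>
    simp only [List.foldlM_cons]
    rw [h d a (by simp)]
    cases g d a with
    | none => rfl
    | some d' => simpa using ih d' (fun d p hp => h d p (by simp [hp]))

lemma pv_innerA (row : List Int) : ∀ (trow : List Int) (d : PySem.Dict Int Int),
    row.length ≤ trow.length →
    (PySem.List.enumerate row 0).foldlM
      (fun d jv => (PySem.List.pyGet? trow jv.1).map (fun t => pvACell d jv.2 t)) d
    = some ((row.zip trow).foldl pvStep d) := by
  induction row with
  | nil => intro trow d _; simp [PySem.List.enumerate_nil]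
  | cons v row ih =>
    intro trow d hlen
    cases trow with
    | nil => simp at hlen
    | cons t trow =>
      simp only [PySem.List.enumerate_cons, List.foldlM_cons, PySem.List.pyGet?_zero_cons,
        Option.map_some, Option.bind_eq_bind, Option.bind_some, zero_add]
      rw [show (1:Int) = 0 + 1 by norm_num, pv_enum_shift row 0, List.foldlM_map]
      rw [pv_foldlM_congr _ _
        (fun d jv => (PySem.List.pyGet? trow jv.1).map (fun t => pvACell d jv.2 t)) _
        ?_]
      · rw [ih trow (pvACell d v t) (by simpa using hlen)]
        simp [pvStep]
      · intro d' p hp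
        rcases (PySem.List.mem_enumerate_iff row 0 p).1 hp with ⟨k, hk, rfl⟩
        simp [PySem.List.pyGet?_cons_succ]

lemma pv_outer_allEmpty (src : List (List Int)) (tgt : List (List Int)) :
    ∀ (s : Int) (d : PySem.Dict Int Int), (∀ row ∈ src, row = []) →
    (PySem.List.enumerate src s).foldlM
      (fun d ir =>
        (PySem.List.enumerate ir.2 0).foldlM
          (fun d jv =>
            ((PySem.List.pyGet? tgt ir.1).bind (fun trow => PySem.List.pyGet? trow jv.1)).map
              (fun t => pvACell d jv.2 t)) d) d
    = some d := by
  induction src with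
  | nil => intro s d _; simp [PySem.List.enumerate_nil]
  | cons r src ih =>
    intro s d h
    have hr : r = [] := h r (by simp)
    simp only [PySem.List.enumerate_cons, List.foldlM_cons, hr, PySem.List.enumerate_nil,
      List.foldlM_nil, Option.bind_eq_bind, Option.bind_some, pure]
    exact ih (s + 1) d (fun row hrow => h row (by simp [hrow]))

lemma pv_outerA (src : List (List Int)) : ∀ (tgt : List (List Int)) (d : PySem.Dict Int Int),
    (∀ i (h : i < src.length), src[i] ≠ [] →
      ∃ h2 : i < tgt.length, src[i].length ≤ tgt[i].length) →
    (PySem.List.enumerate src 0).foldlM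
      (fun d ir =>
        (PySem.List.enumerate ir.2 0).foldlM
          (fun d jv =>
            ((PySem.List.pyGet? tgt ir.1).bind (fun trow => PySem.List.pyGet? trow jv.1)).map
              (fun t => pvACell d jv.2 t)) d) d
    = some (((src.zip tgt).flatMap (fun p => p.1.zip p.2)).foldl pvStep d) := by
  induction src with
  | nil => intro tgt d _; simp [PySem.List.enumerate_nil]
  | cons r src ih =>
    intro tgt d h
    cases tgt with
    | nil =>
      have hall : ∀ row ∈ r :: src, row = [] := by
        intro row hrow
        rcases List.mem_iff_getElem.1 hrow with ⟨i, hi, rfl⟩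
        by_contra hne
        rcases h i hi hne with ⟨h2, _⟩
        simp at h2
      simpa using pv_outer_allEmpty (r :: src) [] 0 d hall
    | cons t tgt =>
      have hlen : r.length ≤ t.length := by
        by_cases hr : r = []
        · simp [hr]
        · rcases h 0 (by simp) (by simpa using hr) with ⟨_, hle⟩
          simpa using hle
      simp only [PySem.List.enumerate_cons, List.foldlM_cons]
      rw [pv_foldlM_congr _ _
        (fun d jv => (PySem.List.pyGet? t jv.1).map (fun t' => pvACell d jv.2 t')) _
        (by intro d' p _; simp)]
      rw [pv_innerA r t d hlen]
      simp only [Option.bind_eq_bind, Option.bind_some]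
      rw [pv_enum_shift src 0, List.foldlM_map]
      rw [pv_foldlM_congr _ _
        (fun d ir =>
          (PySem.List.enumerate ir.2 0).foldlM
            (fun d jv =>
              ((PySem.List.pyGet? tgt ir.1).bind (fun trow => PySem.List.pyGet? trow jv.1)).map
                (fun t' => pvACell d jv.2 t')) d) _ ?_]
      · rw [ih tgt _ ?_]
        · simp [List.foldl_append]
        · intro i hi hne
          rcases h (i + 1) (by simpa using hi) (by simpa using hne) with ⟨h2, hle⟩
          exact ⟨by simpa using h2, by simpa using hle⟩
      · intro d' p hp
        rcases (PySem.List.mem_enumerate_iff src 0 p).1 hp with ⟨k, hk, rfl⟩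
        simp only [zero_add]
        apply pv_foldlM_congr
        intro d'' jv _
        rw [PySem.List.pyGet?_cons_succ]

lemma pv_bump (d : PySem.Dict Int Int) (k c : Int) :
    (if d.contains k then d.modify k 0 (· + 1) else d.insert k 1).getD c 0
      = d.getD c 0 + (if c = k then 1 else 0) := by
  by_cases h : d.contains k = true
  · simp only [h, if_true, PySem.Dict.getD_modify]
    split_ifs with hc
    · subst hc; omega
    · omega
  · simp only [h, Bool.false_eq_true, if_false, PySem.Dict.getD_insert]
    have h0 : d.getD k 0 = 0 :=
      PySem.Dict.getD_of_not_contains d 0 (by simpa using h)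
    split_ifs with hc
    · subst hc; omega
    · omega

lemma pv_drop (d : PySem.Dict Int Int) (k c : Int) :
    (if d.contains k then d.modify k 0 (· - 1) else d.insert k (-1)).getD c 0
      = d.getD c 0 - (if c = k then 1 else 0) := by
  by_cases h : d.contains k = true
  · simp only [h, if_true, PySem.Dict.getD_modify]
    split_ifs with hc
    · subst hc; omega
    · omega
  · simp only [h, Bool.false_eq_true, if_false, PySem.Dict.getD_insert]
    have h0 : d.getD k 0 = 0 :=
      PySem.Dict.getD_of_not_contains d 0 (by simpa using h)
    split_ifs with hc
    · subst hc; omega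
    · omega

lemma pv_getD_pvACell (d : PySem.Dict Int Int) (s t c : Int) :
    (pvACell d s t).getD c 0
      = d.getD c 0 + (if c = s then 1 else 0) - (if c = t then 1 else 0) := by
  unfold pvACell
  rw [pv_drop, pv_bump]

lemma pv_getD_fold (cells : List (Int × Int)) : ∀ (d : PySem.Dict Int Int) (c : Int),
    (cells.foldl pvStep d).getD c 0 = d.getD c 0 + pvF cells c := by
  induction cells with
  | nil => intro d c; simp [pvF]
  | cons p cells ih =>
    intro d c
    simp only [List.foldl_cons, ih, pvStep, pv_getD_pvACell, pvF, List.map_cons,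
      List.count_cons]
    have hbeq1 : (p.1 == c) = decide (c = p.1) := by
      by_cases h : c = p.1
      · simp [h]
      · simp [h, Ne.symm h]
    have hbeq2 : (p.2 == c) = decide (c = p.2) := by
      by_cases h : c = p.2
      · simp [h]
      · simp [h, Ne.symm h]
    rw [hbeq1, hbeq2]
    by_cases h1 : c = p.1 <;> by_cases h2 : c = p.2 <;> simp [h1, h2] <;> omega

lemma pv_mem_keys_pvACell (d : PySem.Dict Int Int) (s t c : Int) :
    c ∈ (pvACell d s t).keys ↔ c = s ∨ c = t ∨ c ∈ d.keys := by
  unfold pvACell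
  have hmem : ∀ (e : PySem.Dict Int Int) (k v : Int) (f : Int → Int),
      c ∈ (if e.contains k then e.modify k 0 f else e.insert k v).keys ↔ c = k ∨ c ∈ e.keys := by
    intro e k v f
    by_cases h : e.contains k = true
    · simp only [h, if_true, PySem.Dict.keys_modify, PySem.Dict.mem_keys_insert]
    · simp only [h, Bool.false_eq_true, if_false, PySem.Dict.mem_keys_insert]
  rw [hmem, hmem]
  tauto

lemma pv_nodup_keys_pvACell (d : PySem.Dict Int Int) (s t : Int)
    (h : d.keys.Nodup) : (pvACell d s t).keys.Nodup := by
  unfold pvACell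
  have hnd : ∀ (e : PySem.Dict Int Int) (k v : Int) (f : Int → Int), e.keys.Nodup →
      (if e.contains k then e.modify k 0 f else e.insert k v).keys.Nodup := by
    intro e k v f he
    by_cases hc : e.contains k = true
    · simp only [hc, if_true, PySem.Dict.keys_modify]
      exact PySem.Dict.nodup_keys_insert e k _ he
    · simp only [hc, Bool.false_eq_true, if_false]
      exact PySem.Dict.nodup_keys_insert e k v he
  exact hnd _ _ _ _ (hnd _ _ _ _ h)

lemma pv_keys_fold (cells : List (Int × Int)) : ∀ (d : PySem.Dict Int Int),
    (d.keys.Nodup → (cells.foldl pvStep d).keys.Nodup) ∧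
    (∀ c, c ∈ (cells.foldl pvStep d).keys ↔
        c ∈ d.keys ∨ c ∈ cells.map (·.1) ∨ c ∈ cells.map (·.2)) := by
  induction cells with
  | nil => intro d; exact ⟨fun h => h, by simp⟩
  | cons p cells ih =>
    intro d
    constructor
    · intro h
      exact ((ih (pvStep d p)).1) (pv_nodup_keys_pvACell d p.1 p.2 h)
    · intro c
      rw [List.foldl_cons, (ih (pvStep d p)).2 c]
      unfold pvStep
      rw [pv_mem_keys_pvACell]
      simp only [List.map_cons, List.mem_cons]
      tauto

lemma pv_count_sum (l : List Int) : ∀ (K : List Int), K.Nodup → (∀ x ∈ l, x ∈ K) →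
    (K.map (fun c => (l.count c : Int))).sum = l.length := by
  induction l with
  | nil => intro K _ _; simp
  | cons a l ih =>
    intro K hnd hsub
    have ha : a ∈ K := hsub a (by simp)
    have hsplit : ∀ c : Int, ((a :: l).count c : Int)
        = (l.count c : Int) + (if c = a then 1 else 0) := by
      intro c
      by_cases hca : c = a
      · subst hca; simp
      · simp [hca, Ne.symm]
    calc (K.map (fun c => ((a :: l).count c : Int))).sum
        = (K.map (fun c => (l.count c : Int) + (if c = a then 1 else 0))).sum := by
          exact congrArg List.sum (List.map_congr_left (fun c _ => hsplit c))
      _ = (K.map (fun c => (l.count c : Int))).sum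
            + (K.map (fun c => if c = a then (1:Int) else 0)).sum :=
          PySem.List.sum_map_add_int K _ _
      _ = (l.length : Int) + 1 := by
          rw [ih K hnd (fun x hx => hsub x (by simp [hx]))]
          congr 1
          have : (K.map (fun c => if c = a then (1:Int) else 0)).sum
              = ((K.countP (fun c => c == a) : Nat) : Int) := by
            rw [← PySem.List.sum_map_ite_one_zero (fun c => c == a) K]
            exact congrArg List.sum (List.map_congr_left (by intro c _; simp))
          rw [this]
          have hcp : K.countP (fun c => c == a) = 1 := by
            have h1 : K.count a = 1 := List.count_eq_one_of_mem hnd ha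
            simpa [List.count] using h1
          rw [hcp]; norm_num
      _ = ((a :: l).length : Int) := by push_cast [List.length_cons]; ring

lemma pv_sum_map_sub (K : List Int) (u v : Int → Int) :
    (K.map (fun c => u c - v c)).sum = (K.map u).sum - (K.map v).sum := by
  induction K with
  | nil => simp
  | cons a K ih => simp [ih]; ring

lemma pv_sum_two_mul_sub (K : List Int) (m f : Int → Int) :
    (K.map (fun c => 2 * m c - f c)).sum = 2 * (K.map m).sum - (K.map f).sum := by
  induction K with
  | nil => simp
  | cons a K ih => simp [ih]; ring

lemma pv_abs_eq (x : Int) : |x| = 2 * max x 0 - x := by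
  rcases le_total x 0 with h | h
  · rw [abs_of_nonpos h, max_eq_right h]; ring
  · rw [abs_of_nonneg h, max_eq_left h]; ring

-- B-side: the two-pointer sweep over sorted lists computes the multiset intersection size
lemma pv_count_eq_zero_of_lt (b : Int) (bs : List Int) (c : Int)
    (hb : (b :: bs).Pairwise (· ≤ ·)) (hc : c < b) :
    Multiset.count c (↑(b :: bs) : Multiset Int) = 0 := by
  rw [Multiset.coe_count, List.count_eq_zero]
  intro hmem
  rcases List.mem_cons.1 hmem with rfl | hmem
  · omega
  · have := (List.pairwise_cons.1 hb).1 c hmem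
    omega

lemma pv_twoPtr_inter : ∀ (a b : List Int),
    a.Pairwise (· ≤ ·) → b.Pairwise (· ≤ ·) →
    pvTwoPtr a b = (((↑a : Multiset Int) ∩ (↑b : Multiset Int)).card : Int)
  | [], b, _, _ => by simp [pvTwoPtr]
  | (x :: xs), [], _, _ => by simp [pvTwoPtr]
  | (x :: xs), (y :: ys), ha, hb => by
    by_cases hxy : x = y
    · subst hxy
      have hinter : ((↑(x :: xs) : Multiset Int) ∩ ↑(x :: ys))
          = x ::ₘ ((↑xs : Multiset Int) ∩ ↑ys) := by
        ext c
        simp only [Multiset.count_inter, Multiset.count_cons, ← Multiset.cons_coe,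
          Multiset.count_cons]
        split_ifs <;> omega
      rw [show pvTwoPtr (x :: xs) (x :: ys) = 1 + pvTwoPtr xs ys by
            simp [pvTwoPtr],
          pv_twoPtr_inter xs ys ha.of_cons hb.of_cons, hinter, Multiset.card_cons]
      push_cast; ring
    · by_cases hlt : x < y
      · have hinter : ((↑(x :: xs) : Multiset Int) ∩ ↑(y :: ys))
            = (↑xs : Multiset Int) ∩ ↑(y :: ys) := by
          ext c
          simp only [Multiset.count_inter, ← Multiset.cons_coe, Multiset.count_cons]
          by_cases hcx : c = x
          · have hcy : ¬ (c = y) := by rw [hcx]; exact hxy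
            have h1 := pv_count_eq_zero_of_lt y ys c hb (by rw [hcx]; exact hlt)
            simp only [← Multiset.cons_coe, Multiset.count_cons, if_neg hcy] at h1
            simp only [if_pos hcx, if_neg hcy]
            omega
          · simp only [if_neg hcx]
            split_ifs <;> omega
        rw [show pvTwoPtr (x :: xs) (y :: ys) = pvTwoPtr xs (y :: ys) by
              simp [pvTwoPtr, hxy, hlt],
            pv_twoPtr_inter xs (y :: ys) ha.of_cons hb, hinter]
      · have hgt : y < x := by omega
        have hinter : ((↑(x :: xs) : Multiset Int) ∩ ↑(y :: ys))
            = (↑(x :: xs) : Multiset Int) ∩ ↑ys := by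
          ext c
          simp only [Multiset.count_inter, ← Multiset.cons_coe, Multiset.count_cons]
          by_cases hcy : c = y
          · have hcx : ¬ (c = x) := by rw [hcy]; exact fun h => hxy h.symm
            have h1 := pv_count_eq_zero_of_lt x xs c ha (by rw [hcy]; exact hgt)
            simp only [← Multiset.cons_coe, Multiset.count_cons, if_neg hcx] at h1
            simp only [if_pos hcy, if_neg hcx]
            omega
          · simp only [if_neg hcy]
            split_ifs <;> omega
        rw [show pvTwoPtr (x :: xs) (y :: ys) = pvTwoPtr (x :: xs) ys by
              simp [pvTwoPtr, hxy, hlt],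
            pv_twoPtr_inter (x :: xs) ys ha hb.of_cons, hinter]
termination_by a b => a.length + b.length
decreasing_by all_goals simp <;> omega

-- size of the multiset intersection as a sum of min-counts over any superset K of l1's colors
lemma pv_inter_card_eq_sum (K l1 l2 : List Int) (hK : K.Nodup)
    (hsub : ∀ x ∈ l1, x ∈ K) :
    ((((↑l1 : Multiset Int) ∩ ↑l2).card : Int))
      = (K.map (fun c => min ((l1.count c : Int)) ((l2.count c : Int)))).sum := by
  have h1 : ((↑l1 : Multiset Int) ∩ ↑l2).card
      = ∑ c ∈ ((↑l1 : Multiset Int) ∩ ↑l2).toFinset,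
          ((↑l1 : Multiset Int) ∩ ↑l2).count c :=
    (Multiset.toFinset_sum_count_eq _).symm
  have hsubF : ((↑l1 : Multiset Int) ∩ ↑l2).toFinset ⊆ K.toFinset := by
    intro c hc
    rw [Multiset.mem_toFinset] at hc
    have hc1 : c ∈ (↑l1 : Multiset Int) := (Multiset.mem_inter.1 hc).1
    rw [List.mem_toFinset]
    exact hsub c (by simpa using hc1)
  have h2 : ∑ c ∈ ((↑l1 : Multiset Int) ∩ ↑l2).toFinset,
        ((↑l1 : Multiset Int) ∩ ↑l2).count c
      = ∑ c ∈ K.toFinset, ((↑l1 : Multiset Int) ∩ ↑l2).count c := by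
    refine Finset.sum_subset hsubF ?_
    intro c _ hc
    rw [Multiset.mem_toFinset] at hc
    exact Multiset.count_eq_zero_of_notMem hc
  have h3 : ∀ c, (((↑l1 : Multiset Int) ∩ ↑l2).count c : Int)
      = min ((l1.count c : Int)) ((l2.count c : Int)) := by
    intro c
    rw [Multiset.count_inter]
    simp only [Multiset.coe_count]
    push_cast [Nat.cast_min]
    rfl
  calc ((((↑l1 : Multiset Int) ∩ ↑l2).card : Int))
      = ((∑ c ∈ K.toFinset, ((↑l1 : Multiset Int) ∩ ↑l2).count c : Nat) : Int) := by
        rw [h1, h2]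
    _ = ∑ c ∈ K.toFinset, (((↑l1 : Multiset Int) ∩ ↑l2).count c : Int) := by push_cast; rfl
    _ = ∑ c ∈ K.toFinset, min ((l1.count c : Int)) ((l2.count c : Int)) :=
        Finset.sum_congr rfl (fun c _ => h3 c)
    _ = (K.map (fun c => min ((l1.count c : Int)) ((l2.count c : Int)))).sum := by
        rw [← List.sum_toFinset _ hK]

-- ===== VERDICT (by name: the statement is the Claim_ definition above) =====
theorem minimumSwitchingTimes_spec : Claim_equal_minimumSwitchingTimes := by
  intro source target _ hpre
  unfold Spec_minimumSwitchingTimes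
  -- the flattened cell pairs and the two flattened color lists
  set cells := pvPairs source target with hcells
  set firsts := cells.map (·.1) with hfirsts
  set seconds := cells.map (·.2) with hseconds
  set f := pvF cells with hf
  -- the lists B sorts are exactly firsts and seconds
  have hS : pvFlatS source target = firsts := by
    simp only [pvFlatS, hfirsts, hcells, pvPairs, List.map_flatMap]
  have hT : pvFlatT source target = seconds := by
    simp only [pvFlatT, hseconds, hcells, pvPairs, List.map_flatMap]
  -- reduce A to a fold over the cells
  have hloop : pvALoop source target = some (cells.foldl pvStep PySem.Dict.empty) := by
    unfold pvALoop
    exact pv_outerA source target PySem.Dict.empty hpre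
  set dA := cells.foldl pvStep PySem.Dict.empty with hdA
  have hA : minimumSwitchingTimes source target
      = PySem.Int.floordiv (dA.values.foldl (fun r v => r + |v|) 0) 2 := by
    simp only [minimumSwitchingTimes, hloop]
  -- A-side: keys of the accumulated dict
  have hndA : dA.keys.Nodup :=
    (pv_keys_fold cells PySem.Dict.empty).1 PySem.Dict.nodup_keys_empty
  have hmemA : ∀ c, c ∈ dA.keys ↔ c ∈ firsts ∨ c ∈ seconds := by
    intro c
    rw [hdA, (pv_keys_fold cells PySem.Dict.empty).2 c, PySem.Dict.keys_empty]
    simp only [List.not_mem_nil, false_or]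
    rw [← hfirsts, ← hseconds]
  have hgetA : ∀ c, dA.getD c 0 = f c := by
    intro c
    rw [hdA, pv_getD_fold cells PySem.Dict.empty c, PySem.Dict.getD_empty]
    simp [hf]
  -- A-side: the abs-sum over the keys
  have hresA : dA.values.foldl (fun r v => r + |v|) 0
      = (dA.keys.map (fun c => |f c|)).sum := by
    rw [PySem.List.foldl_add dA.values (fun v => |v|) 0,
      PySem.Dict.values_eq_map_keys dA hndA 0, List.map_map]
    simp only [Function.comp_def, hgetA, zero_add]
  -- the signed counts over all seen colors sum to zero
  have hsum0 : (dA.keys.map f).sum = 0 := by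
    have hsplit : (dA.keys.map f).sum
        = (dA.keys.map (fun c => (firsts.count c : Int))).sum
          - (dA.keys.map (fun c => (seconds.count c : Int))).sum := by
      rw [← pv_sum_map_sub]
      exact congrArg List.sum (List.map_congr_left (fun c _ => rfl))
    rw [hsplit, pv_count_sum firsts dA.keys hndA (fun x hx => (hmemA x).2 (Or.inl hx)),
      pv_count_sum seconds dA.keys hndA (fun x hx => (hmemA x).2 (Or.inr hx))]
    simp [hfirsts, hseconds]
  -- |f| sums to twice the positive part minus the (zero) total
  have habs : (dA.keys.map (fun c => |f c|)).sum
      = 2 * (dA.keys.map (fun c => max (f c) 0)).sum - (dA.keys.map f).sum := by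
    have e1 : (dA.keys.map (fun c => |f c|)).sum
        = (dA.keys.map (fun c => 2 * max (f c) 0 - f c)).sum :=
      congrArg List.sum (List.map_congr_left (fun c _ => pv_abs_eq (f c)))
    have e2 := pv_sum_two_mul_sub dA.keys (fun c => max (f c) 0) f
    simp only [] at e2
    rw [e1, e2]
  -- positive part = source count minus min count, summed: N - |intersection|
  have hmax : (dA.keys.map (fun c => max (f c) 0)).sum
      = (firsts.length : Int)
        - (dA.keys.map (fun c => min ((firsts.count c : Int)) ((seconds.count c : Int)))).sum := by
    have e1 : (dA.keys.map (fun c => max (f c) 0)).sum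
        = (dA.keys.map (fun c => (firsts.count c : Int)
            - min ((firsts.count c : Int)) ((seconds.count c : Int)))).sum := by
      refine congrArg List.sum (List.map_congr_left (fun c _ => ?_))
      have hfc : f c = ((firsts.count c : Int)) - ((seconds.count c : Int)) := rfl
      rw [hfc]
      omega
    rw [e1, pv_sum_map_sub,
      pv_count_sum firsts dA.keys hndA (fun x hx => (hmemA x).2 (Or.inl hx))]
  -- B-side: sorted lists, two-pointer = intersection size
  set sa := PySem.List.sorted firsts (fun x => x) false with hsa
  set sb := PySem.List.sorted seconds (fun x => x) false with hsb
  have hperm_a : sa.Perm firsts := PySem.List.sorted_perm firsts (fun x => x) false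
  have hperm_b : sb.Perm seconds := PySem.List.sorted_perm seconds (fun x => x) false
  have hpa : sa.Pairwise (· ≤ ·) := by
    have := PySem.List.sorted_pairwise firsts (fun x => x)
    simpa using this
  have hpb : sb.Pairwise (· ≤ ·) := by
    have := PySem.List.sorted_pairwise seconds (fun x => x)
    simpa using this
  have hcoe_a : (↑sa : Multiset Int) = ↑firsts := Quot.sound hperm_a
  have hcoe_b : (↑sb : Multiset Int) = ↑seconds := Quot.sound hperm_b
  have hB : minimumSwitchingTimes_alt source target
      = (firsts.length : Int)
        - (((↑firsts : Multiset Int) ∩ ↑seconds).card : Int) := by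
    show (((PySem.List.sorted (pvFlatS source target) (fun x => x) false).length : Int)
        - pvTwoPtr (PySem.List.sorted (pvFlatS source target) (fun x => x) false)
            (PySem.List.sorted (pvFlatT source target) (fun x => x) false)) = _
    rw [hS, hT, ← hsa, ← hsb, pv_twoPtr_inter sa sb hpa hpb, hcoe_a, hcoe_b,
      hperm_a.length_eq]
  rw [hA, hresA, habs, hsum0, hmax,
    pv_inter_card_eq_sum dA.keys firsts seconds hndA
      (fun x hx => (hmemA x).2 (Or.inl hx)) |>.symm] at *
  rw [hB]
  set N := (firsts.length : Int)
  set I := (((↑firsts : Multiset Int) ∩ ↑seconds).card : Int)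
  show PySem.Int.floordiv (2 * (N - I) - 0) 2 = N - I
  unfold PySem.Int.floordiv
  rw [sub_zero]
  exact Int.mul_fdiv_cancel_left _ (by norm_num)
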